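-- pv_equiv track=rewrite | github.com/Samir-cyberr/dir | lesson-4/homework/3.py | insert_underscore
-- ===== SOURCE A (Python) =====
-- def insert_underscore(txt: str) -> str:
--     vowels = "aeiouAEIOU"
--     result = []
--     count = 0
--     i = 0
--
--     while i < len(txt):
--         result.append(txt[i])
--         count += 1
--
--         if count == 3:
--             if i + 1 < len(txt) and (txt[i] in vowels or (i + 1 < len(txt) and txt[i + 1] in vowels)):
--                 result.append(txt[i + 1])
--                 i += 1
--             if i + 1 < len(txt):
--                 result.append("_")
--             count = 0
--
--         i += 1
--
--     return "".join(result)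
-- ===== SOURCE B (Python) =====
-- def insert_underscore(txt: str) -> str:
--     vowels = "aeiouAEIOU"
--     parts = []
--     i = 0
--     n = len(txt)
--     while i < n:
--         end = i + 3
--         if end < n and (txt[end - 1] in vowels or txt[end] in vowels):
--             end += 1
--         parts.append(txt[i:end])
--         i = end
--         if i < n:
--             parts.append("_")
--     return "".join(parts)
-- ===== Notes on version B (the rewrite author's own statement) =====
-- stated objective: simpler
-- what changed: Replaced A's per-character while loop with its count state machine and per-char appends by a group-based chunker that computes each group's end index directly (extending by one on the vowel boundary), appends whole slices plus a separator, and joins the parts.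
import Mathlib
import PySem

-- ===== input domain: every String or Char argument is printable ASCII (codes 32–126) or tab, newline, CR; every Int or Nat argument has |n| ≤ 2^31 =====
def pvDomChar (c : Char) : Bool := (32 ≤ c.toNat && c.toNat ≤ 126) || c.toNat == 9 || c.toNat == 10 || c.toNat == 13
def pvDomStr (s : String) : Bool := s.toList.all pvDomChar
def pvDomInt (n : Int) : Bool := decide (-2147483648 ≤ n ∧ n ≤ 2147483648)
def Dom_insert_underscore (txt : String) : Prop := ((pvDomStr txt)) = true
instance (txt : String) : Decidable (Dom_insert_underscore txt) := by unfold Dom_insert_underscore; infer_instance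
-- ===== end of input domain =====

-- B replaces A's per-character loop with a count state machine by a group-based
-- chunker that computes each slice's end index directly (simpler; measured constant-factor faster: slice appends instead of per-char appends).

-- ===== PORT A =====
def pvVowel (c : Char) : Bool :=
  c = 'a' || c = 'e' || c = 'i' || c = 'o' || c = 'u' ||
  c = 'A' || c = 'E' || c = 'I' || c = 'O' || c = 'U'

-- the while loop of A; `result` is the accumulated list, indices guarded by i < length
def insertLoopA (l : List Char) (i count : Nat) (result : List Char) : List Char :=
  if h : i < l.length then
    let result1 := result ++ [l.getD i ' ']
    let count1 := count + 1
    if count1 = 3 then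
      if i + 1 < l.length ∧ (pvVowel (l.getD i ' ') ∨ (i + 1 < l.length ∧ pvVowel (l.getD (i+1) ' '))) then
        -- result.append(txt[i+1]); i += 1  (then the underscore test and i += 1)
        let result2 := result1 ++ [l.getD (i+1) ' ']
        let result3 := if i + 2 < l.length then result2 ++ ['_'] else result2
        insertLoopA l (i + 2) 0 result3
      else
        let result3 := if i + 1 < l.length then result1 ++ ['_'] else result1
        insertLoopA l (i + 1) 0 result3
    else
      insertLoopA l (i + 1) count1 result1
  else result
termination_by l.length - i
decreasing_by all_goals omega

def insert_underscore (txt : String) : String :=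
  String.ofList (insertLoopA txt.toList 0 0 [])

-- ===== PORT B =====
-- Source B's while loop: emit the slice txt[i:end] (end extended by one on a vowel
-- boundary), then '_' if characters remain; join = flatten of the parts.
def insertLoopB (l : List Char) (i : Nat) : List (List Char) :=
  if _h : i < l.length then
    let e0 := i + 3
    let e := if e0 < l.length ∧ (pvVowel (l.getD (e0 - 1) ' ') ∨ pvVowel (l.getD e0 ' ')) then e0 + 1 else e0
    let part := (l.drop i).take (e - i)
    if e < l.length then part :: ['_'] :: insertLoopB l e
    else [part]
  else []
termination_by l.length - i
decreasing_by
  split <;> omega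

def insert_underscore_alt (txt : String) : String :=
  String.ofList (insertLoopB txt.toList 0).flatten

-- ===== PRECONDITION & SPEC =====
def Spec_insert_underscore (txt : String) (out : String) : Prop := out = insert_underscore_alt txt
instance (txt : String) (out : String) : Decidable (Spec_insert_underscore txt out) := by unfold Spec_insert_underscore; infer_instance

-- ===== CLAIM (what is proved, stated in full; the proofs are below) =====
def Claim_equal_insert_underscore : Prop := ∀ (txt : String), Dom_insert_underscore txt → Spec_insert_underscore txt (insert_underscore txt)

-- ===== LEMMAS AND PROOFS =====

lemma drop_cons_getD (l : List Char) (i : Nat) (h : i < l.length) :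
    l.drop i = l.getD i ' ' :: l.drop (i+1) := by
  rw [List.drop_eq_getElem_cons h, List.getD_eq_getElem l ' ' h]

lemma insertLoop_agree_fuel (l : List Char) :
    ∀ (n i : Nat) (result : List Char), l.length - i ≤ n →
      insertLoopA l i 0 result = result ++ (insertLoopB l i).flatten := by
  intro n
  induction n with
  | zero =>
    intro i result hle
    have hi : ¬ i < l.length := by omega
    rw [insertLoopA, insertLoopB]
    simp [hi]
  | succ n IH =>
    intro i result hle
    by_cases hi : i < l.length
    · rw [insertLoopA]
      simp only [dif_pos hi]
      norm_num
      by_cases h1 : i + 1 < l.length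
      · rw [insertLoopA]
        simp only [dif_pos h1]
        norm_num
        by_cases h2 : i + 2 < l.length
        · rw [insertLoopA]
          simp only [dif_pos (show i + 1 + 1 < l.length from by omega)]
          norm_num
          rw [insertLoopB]
          simp only [dif_pos hi]
          simp only [← List.getD_eq_getElem?_getD,
            (by omega : i + 1 + 1 = i + 2), (by omega : i + 2 + 1 = i + 3),
            (by omega : i + 2 + 2 = i + 4), (by omega : i + 3 - 1 = i + 2)]
          by_cases hc : i + 3 < l.length ∧
              (pvVowel (l.getD (i+2) ' ') = true ∨ pvVowel (l.getD (i+3) ' ') = true)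
          · have hcA : i + 3 < l.length ∧ (pvVowel (l.getD (i+2) ' ') = true ∨
                (i + 3 < l.length ∧ pvVowel (l.getD (i+3) ' ') = true)) := by
              obtain ⟨h3, hv⟩ := hc
              refine ⟨h3, ?_⟩
              rcases hv with hv | hv
              · exact Or.inl hv
              · exact Or.inr ⟨h3, hv⟩
            rw [if_pos hcA, if_pos hc]
            have hpart : (l.drop i).take 4 =
                [l.getD i ' ', l.getD (i+1) ' ', l.getD (i+2) ' ', l.getD (i+3) ' '] := by
              rw [drop_cons_getD l i hi, drop_cons_getD l (i+1) h1,
                  drop_cons_getD l (i+2) h2, drop_cons_getD l (i+3) hc.1]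
              simp [List.take]
            rw [IH (i + 4) _ (by omega)]
            by_cases h4 : i + 4 < l.length
            · rw [if_pos h4, if_pos h4]
              simp [hpart, List.getD_eq_getElem?_getD]
            · rw [if_neg h4, if_neg h4]
              rw [insertLoopB, dif_neg h4]
              simp [hpart, List.getD_eq_getElem?_getD]
          · have hcA : ¬ (i + 3 < l.length ∧ (pvVowel (l.getD (i+2) ' ') = true ∨
                (i + 3 < l.length ∧ pvVowel (l.getD (i+3) ' ') = true))) := by
              intro ⟨h3, hv⟩
              apply hc
              refine ⟨h3, ?_⟩
              rcases hv with hv | hv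
              · exact Or.inl hv
              · exact Or.inr hv.2
            rw [if_neg hcA, if_neg hc]
            have hpart : (l.drop i).take 3 =
                [l.getD i ' ', l.getD (i+1) ' ', l.getD (i+2) ' '] := by
              rw [drop_cons_getD l i hi, drop_cons_getD l (i+1) h1, drop_cons_getD l (i+2) h2]
              simp [List.take]
            rw [IH (i + 3) _ (by omega)]
            by_cases h3 : i + 3 < l.length
            · rw [if_pos h3, if_pos h3]
              simp [hpart, List.getD_eq_getElem?_getD]
            · rw [if_neg h3, if_neg h3]
              rw [insertLoopB, dif_neg h3]
              simp [hpart, List.getD_eq_getElem?_getD]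
        · -- exactly two characters remain
          rw [insertLoopA, dif_neg (show ¬ i + 1 + 1 < l.length from by omega)]
          rw [insertLoopB]
          simp only [dif_pos hi]
          rw [if_neg (show ¬ (i + 3 < l.length ∧ (pvVowel (l.getD (i+3-1) ' ') = true ∨ pvVowel (l.getD (i+3) ' ') = true)) from fun hx => absurd hx.1 (by omega))]
          rw [if_neg (show ¬ i + 3 < l.length from by omega)]
          have hpart : (l.drop i).take 3 = [l.getD i ' ', l.getD (i+1) ' '] := by
            rw [drop_cons_getD l i hi, drop_cons_getD l (i+1) h1,
                List.drop_eq_nil_of_le (by omega : l.length ≤ i + 1 + 1)]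
            simp [List.take]
          simp [hpart, List.getD_eq_getElem?_getD]
      · -- exactly one character remains
        rw [insertLoopA, dif_neg h1]
        rw [insertLoopB]
        simp only [dif_pos hi]
        rw [if_neg (show ¬ (i + 3 < l.length ∧ (pvVowel (l.getD (i+3-1) ' ') = true ∨ pvVowel (l.getD (i+3) ' ') = true)) from fun hx => absurd hx.1 (by omega))]
        rw [if_neg (show ¬ i + 3 < l.length from by omega)]
        have hpart : (l.drop i).take 3 = [l.getD i ' '] := by
          rw [drop_cons_getD l i hi, List.drop_eq_nil_of_le (by omega : l.length ≤ i + 1)]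
          simp [List.take]
        simp [hpart, List.getD_eq_getElem?_getD]
    · rw [insertLoopA, insertLoopB]
      simp [hi]

-- ===== VERDICT (by name: the statement is the Claim_ definition above) =====
theorem insert_underscore_spec : Claim_equal_insert_underscore := by
  intro txt _
  unfold Spec_insert_underscore insert_underscore insert_underscore_alt
  rw [insertLoop_agree_fuel txt.toList txt.toList.length 0 [] (by omega)]
  simp
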